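-- pv_equiv track=rewrite | github.com/ArcticLampyrid/travellings-graph | travellings_graph/domain_utils.py | host_or_sub_in_list
-- ===== SOURCE A (Python) =====
-- def host_or_sub_in_list(host: str, hosts: set[str]) -> bool:
--     if host in hosts:
--         return True
--     dot_index = host.find(".")
--     while dot_index != -1:
--         host = host[dot_index + 1 :]
--         if host in hosts:
--             return True
--         dot_index = host.find(".")
--     return False
-- ===== SOURCE B (Python) =====
-- def host_or_sub_in_list(host: str, hosts: set[str]) -> bool:
--     # single scan: the candidate suffixes are host itself and the part after each dot
--     return host in hosts or any(
--         ch == "." and host[i + 1:] in hosts for i, ch in enumerate(host)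
--     )
-- ===== Notes on version B (the rewrite author's own statement) =====
-- stated objective: idiomatic
-- what changed: Replaces the progressive find/slice mutation loop with one enumerate scan over the characters that tests the suffix after each dot directly via any(...), plus the initial whole-host test.
import Mathlib
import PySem

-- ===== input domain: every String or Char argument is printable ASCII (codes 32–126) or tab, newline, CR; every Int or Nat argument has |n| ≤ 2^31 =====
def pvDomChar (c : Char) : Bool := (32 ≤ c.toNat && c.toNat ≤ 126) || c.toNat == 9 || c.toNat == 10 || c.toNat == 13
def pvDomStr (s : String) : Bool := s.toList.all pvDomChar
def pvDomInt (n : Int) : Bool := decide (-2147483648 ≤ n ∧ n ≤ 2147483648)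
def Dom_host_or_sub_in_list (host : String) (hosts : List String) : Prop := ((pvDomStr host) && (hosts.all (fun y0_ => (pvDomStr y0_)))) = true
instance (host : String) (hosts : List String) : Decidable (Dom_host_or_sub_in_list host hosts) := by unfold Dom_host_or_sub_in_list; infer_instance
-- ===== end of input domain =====

-- B replaces A's progressive find/slice loop with a single enumerate scan testing the suffix after each dot (idiomatic any(...)); return values proved equal.
-- ===== PORT A =====
def hostOrSubAux (hostsL : List (List Char)) (cs : List Char) : Bool :=
  let d := PySem.Chars.find cs ['.']
  if h : d = -1 then false
  else
    let cs' := PySem.List.slice cs (some (d + 1)) none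
    if hostsL.contains cs' then true else hostOrSubAux hostsL cs'
termination_by cs.length
decreasing_by
  have hne : PySem.Chars.find cs ['.'] ≠ -1 := h
  have hnn : 0 ≤ PySem.Chars.find cs ['.'] := by
    have := PySem.Chars.neg_one_le_find (s := cs) (sub := ['.'])
    omega
  have hin : ['.'] <:+: cs := (PySem.Chars.find_nonneg_iff cs ['.']).mp hnn
  have hcs : cs ≠ [] := by
    rintro rfl
    exact hne ((PySem.Chars.find_eq_neg_one_iff [] ['.']).mpr (by simp))
  have hslice : PySem.List.slice cs (some (PySem.Chars.find cs ['.'] + 1)) none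
      = cs.drop (PySem.Chars.find cs ['.'] + 1).toNat :=
    PySem.List.slice_from cs (by omega)
  simp only [hslice, List.length_drop]
  have : 0 < cs.length := List.length_pos_iff.mpr hcs
  omega

def host_or_sub_in_list (host : String) (hosts : List String) : Bool :=
  if (hosts.map String.toList).contains host.toList then true
  else hostOrSubAux (hosts.map String.toList) host.toList


-- ===== PORT B =====
def host_or_sub_in_list_alt (host : String) (hosts : List String) : Bool :=
  (hosts.map String.toList).contains host.toList ||
    (PySem.List.enumerate host.toList).any (fun p =>
      p.2 == '.' && (hosts.map String.toList).contains
        (PySem.List.slice host.toList (some (p.1 + 1)) none))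


-- ===== PRECONDITION & SPEC =====
def Spec_host_or_sub_in_list (host : String) (hosts : List String) (out : Bool) : Prop := out = host_or_sub_in_list_alt host hosts
instance (host : String) (hosts : List String) (out : Bool) : Decidable (Spec_host_or_sub_in_list host hosts out) := by unfold Spec_host_or_sub_in_list; infer_instance

-- ===== CLAIM (what is proved, stated in full; the proofs are below) =====
def Claim_equal_host_or_sub_in_list : Prop := ∀ (host : String) (hosts : List String), Dom_host_or_sub_in_list host hosts → Spec_host_or_sub_in_list host hosts (host_or_sub_in_list host hosts)

-- ===== LEMMAS AND PROOFS =====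

-- ===== VERDICT (by name: the statement is the Claim_ definition above) =====
-- singleton-prefix ↔ first element
theorem singleton_prefix_iff (c : Char) (l : List Char) : [c] <+: l ↔ l[0]? = some c := by
  cases l with
  | nil => simp
  | cons a t =>
    constructor
    · rintro ⟨u, hu⟩
      simp at hu
      simp [hu.1]
    · intro h
      simp at h
      exact ⟨t, by simp [h]⟩

-- SufHit hostsL cs: some suffix of cs starting right after a dot is in hostsL
def SufHit (hostsL : List (List Char)) (cs : List Char) : Prop :=
  ∃ i : Nat, cs[i]? = some '.' ∧ cs.drop (i + 1) ∈ hostsL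

theorem aux_char (hostsL : List (List Char)) (cs : List Char) :
    hostOrSubAux hostsL cs = true ↔ SufHit hostsL cs := by
  fun_induction hostOrSubAux hostsL cs with
  | case1 cs d h =>
    simp only [Bool.false_eq_true, false_iff]
    rintro ⟨i, hi, -⟩
    have hnin : ¬ ['.'] <:+: cs := (PySem.Chars.find_eq_neg_one_iff cs ['.']).mp h
    exact hnin ((((singleton_prefix_iff '.' (cs.drop i)).mpr (by simpa using hi)).isInfix).trans
      (cs.drop_suffix i).isInfix)
  | case2 cs d h cs' hc =>
    have hnn : 0 ≤ PySem.Chars.find cs ['.'] := by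
      have := PySem.Chars.neg_one_le_find (s := cs) (sub := ['.'])
      omega
    have hfs := PySem.Chars.find_spec (s := cs) (sub := ['.']) hnn
    have hslice := PySem.List.slice_from cs (show (0:Int) ≤ PySem.Chars.find cs ['.'] + 1 by omega)
    have hcs' : cs' = cs.drop ((PySem.Chars.find cs ['.']).toNat + 1) := by
      show PySem.List.slice cs (some (PySem.Chars.find cs ['.'] + 1)) none = _
      rw [hslice]; congr 1; omega
    simp only [true_iff]
    refine ⟨(PySem.Chars.find cs ['.']).toNat, ?_, ?_⟩
    · have := (singleton_prefix_iff '.' (cs.drop (PySem.Chars.find cs ['.']).toNat)).mp hfs.1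
      simpa using this
    · rw [← hcs']; exact (List.contains_iff_mem).mp hc
  | case3 cs d h cs' hc ih =>
    have hnn : 0 ≤ PySem.Chars.find cs ['.'] := by
      have := PySem.Chars.neg_one_le_find (s := cs) (sub := ['.'])
      omega
    have hfs := PySem.Chars.find_spec (s := cs) (sub := ['.']) hnn
    have hslice := PySem.List.slice_from cs (show (0:Int) ≤ PySem.Chars.find cs ['.'] + 1 by omega)
    have hcs' : cs' = cs.drop ((PySem.Chars.find cs ['.']).toNat + 1) := by
      show PySem.List.slice cs (some (PySem.Chars.find cs ['.'] + 1)) none = _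
      rw [hslice]; congr 1; omega
    rw [ih]
    constructor
    · rintro ⟨j, hj, hmem⟩
      refine ⟨(PySem.Chars.find cs ['.']).toNat + 1 + j, ?_, ?_⟩
      · rw [← List.getElem?_drop, ← hcs']; exact hj
      · rw [show (PySem.Chars.find cs ['.']).toNat + 1 + j + 1
            = ((PySem.Chars.find cs ['.']).toNat + 1) + (j + 1) by omega,
          ← List.drop_drop, ← hcs']
        exact hmem
    · rintro ⟨i, hi, hmem⟩
      have hge : (PySem.Chars.find cs ['.']).toNat ≤ i := by
        by_contra hlt
        exact hfs.2 i (by omega) ((singleton_prefix_iff '.' (cs.drop i)).mpr (by simpa using hi))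
      rcases Nat.eq_or_lt_of_le hge with heq | hlt
      · exfalso
        have : cs' ∈ hostsL := by rw [hcs', heq]; exact hmem
        simp only [List.contains_iff_mem] at hc
        exact hc this
      · refine ⟨i - (PySem.Chars.find cs ['.']).toNat - 1, ?_, ?_⟩
        · rw [hcs', List.getElem?_drop,
            show (PySem.Chars.find cs ['.']).toNat + 1 + (i - (PySem.Chars.find cs ['.']).toNat - 1) = i by omega]
          exact hi
        · rw [hcs', List.drop_drop,
            show (PySem.Chars.find cs ['.']).toNat + 1 + (i - (PySem.Chars.find cs ['.']).toNat - 1 + 1) = i + 1 by omega]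
          exact hmem

theorem alt_char (hostsL : List (List Char)) (cs : List Char) :
    ((PySem.List.enumerate cs).any (fun p =>
      p.2 == '.' && hostsL.contains (PySem.List.slice cs (some (p.1 + 1)) none))) = true
      ↔ SufHit hostsL cs := by
  rw [PySem.List.enumerate_eq_zipIdx_map, List.any_map, List.any_eq_true]
  constructor
  · rintro ⟨⟨c, i⟩, hpmem, hp⟩
    have hget : cs[i]? = some c := List.mem_zipIdx_iff_getElem?.mp hpmem
    simp only [Function.comp] at hp
    obtain ⟨hc, hcont⟩ := Bool.and_eq_true_iff.mp hp
    refine ⟨i, by rw [hget, beq_iff_eq.mp hc], ?_⟩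
    rw [PySem.List.slice_from cs (by positivity)] at hcont
    have : ((0 : Int) + i + 1).toNat = i + 1 := by omega
    rw [this] at hcont
    exact List.contains_iff_mem.mp hcont
  · rintro ⟨i, hi, hmem⟩
    refine ⟨('.', i), List.mem_zipIdx_iff_getElem?.mpr (by simpa using hi), ?_⟩
    simp only [Function.comp]
    rw [PySem.List.slice_from cs (by positivity)]
    have : ((0 : Int) + i + 1).toNat = i + 1 := by omega
    rw [this]
    simp [hmem]

-- ===== VERDICT (by name: the statement is the Claim_ definition above) =====
theorem host_or_sub_in_list_spec : Claim_equal_host_or_sub_in_list := by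
  intro host hosts _
  unfold Spec_host_or_sub_in_list host_or_sub_in_list host_or_sub_in_list_alt
  cases hc : (hosts.map String.toList).contains host.toList with
  | true => simp
  | false =>
    simp only [Bool.false_eq_true, if_false, Bool.false_or]
    rw [Bool.eq_iff_iff, aux_char, alt_char]
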